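-- pv_equiv track=rewrite | github.com/ikeniborn/pac1-tool | agent/pipeline.py | _extract_sku_refs
-- ===== SOURCE A (Python) =====
-- def _extract_sku_refs(queries: list[str], results: list[str]) -> list[str]:
--     refs: list[str] = []
--     for result_txt in results:
--         lines = [ln.strip() for ln in result_txt.strip().splitlines() if ln.strip()]
--         if len(lines) < 2:
--             continue
--         headers = [h.strip().lower() for h in lines[0].split(",")]
--         if "path" in headers:
--             path_idx = headers.index("path")
--             for row in lines[1:]:
--                 cols = row.split(",")
--                 if path_idx < len(cols):
--                     path = cols[path_idx].strip().strip('"')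
--                     if path:
--                         refs.append(path)
--         elif "sku" in headers:
--             sku_idx = headers.index("sku")
--             for row in lines[1:]:
--                 cols = row.split(",")
--                 if sku_idx < len(cols):
--                     sku = cols[sku_idx].strip().strip('"')
--                     if sku:
--                         refs.append(f"/proc/catalog/{sku}.json")
--         if "store_id" in headers:
--             store_idx = headers.index("store_id")
--             for row in lines[1:]:
--                 cols = row.split(",")
--                 if store_idx < len(cols):
--                     store_id = cols[store_idx].strip().strip('"')
--                     if store_id:
--                         refs.append(f"/proc/stores/{store_id}.json")
--     return refs
-- ===== SOURCE B (Python) =====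
-- def _extract_sku_refs(queries: list[str], results: list[str]) -> list[str]:
--     refs: list[str] = []
--     for txt in results:
--         lines = [ln.strip() for ln in txt.strip().splitlines() if ln.strip()]
--         if len(lines) < 2:
--             continue
--         headers = [h.strip().lower() for h in lines[0].split(",")]
--         if "path" in headers:
--             spec1 = (headers.index("path"), "", "")
--         elif "sku" in headers:
--             spec1 = (headers.index("sku"), "/proc/catalog/", ".json")
--         else:
--             spec1 = None
--         if "store_id" in headers:
--             spec2 = (headers.index("store_id"), "/proc/stores/", ".json")
--         else:
--             spec2 = None
--         b1: list[str] = []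
--         b2: list[str] = []
--         for row in lines[1:]:
--             cols = row.split(",")
--             for spec, bucket in ((spec1, b1), (spec2, b2)):
--                 if spec is not None:
--                     idx, pre, suf = spec
--                     if idx < len(cols):
--                         val = cols[idx].strip().strip('"')
--                         if val:
--                             bucket.append(pre + val + suf)
--         refs += b1 + b2
--     return refs
-- ===== Notes on version B (the rewrite author's own statement) =====
-- stated objective: alternative
-- what changed: Replaces A's up-to-two separate loops over the data rows (path-or-sku pass, then store_id pass) by a precomputed table of (index, prefix, suffix) extraction specs and a SINGLE pass over the rows filling two buckets, appended in order afterwards.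
import Mathlib
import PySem

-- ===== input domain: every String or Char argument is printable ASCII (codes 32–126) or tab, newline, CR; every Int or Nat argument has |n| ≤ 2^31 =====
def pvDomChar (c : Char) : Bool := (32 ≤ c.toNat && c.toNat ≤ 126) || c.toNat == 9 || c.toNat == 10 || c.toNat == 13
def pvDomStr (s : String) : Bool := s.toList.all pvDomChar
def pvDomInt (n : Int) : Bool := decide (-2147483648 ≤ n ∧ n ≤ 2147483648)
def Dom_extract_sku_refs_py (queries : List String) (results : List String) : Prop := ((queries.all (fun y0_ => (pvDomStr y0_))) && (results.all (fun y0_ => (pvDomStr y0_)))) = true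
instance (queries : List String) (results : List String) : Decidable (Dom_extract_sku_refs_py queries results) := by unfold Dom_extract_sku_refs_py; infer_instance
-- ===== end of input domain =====

-- B replaces A's up-to-two separate passes over the data rows by one table of extraction
-- specs and a SINGLE pass filling two buckets that are appended in order (alternative decomposition).

-- shared by both ports: '[ln.strip() for ln in txt.strip().splitlines() if ln.strip()]'
-- (value and filter test are both ln.strip(), so map-then-filter is exact)
def pvCleanLines (txt : String) : List String :=
  ((PySem.Str.splitlines (PySem.Str.strip txt)).map PySem.Str.strip).filter (fun l => l ≠ "")

-- shared: '[h.strip().lower() for h in lines[0].split(",")]'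
def pvHeaders (l0 : String) : List String :=
  ((PySem.Str.split? l0 ",").getD []).map (fun h => PySem.Str.lower (PySem.Str.strip h))

-- f"{pre}{mid}{suf}" built on the char-list side (exact; String.append is opaque to the kernel)
def pvFstr (pre mid suf : String) : String := String.ofList (pre.toList ++ mid.toList ++ suf.toList)

-- ===== PORT A =====
-- Literal transliteration: per result, an if/elif path-or-sku row loop, then an independent
-- store_id row loop; '.index' after the 'in' guard is PySem.List.index? with an unreachable .getD 0.
def extract_sku_refs_py (queries : List String) (results : List String) : List String :=
  results.foldl (fun refs result_txt =>
    let lines := pvCleanLines result_txt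
    if lines.length < 2 then refs
    else
      let headers := pvHeaders (lines.headD "")
      let refs1 :=
        if headers.contains "path" then
          let path_idx := (PySem.List.index? headers "path").getD 0
          lines.tail.foldl (fun acc row =>
            let cols := (PySem.Str.split? row ",").getD []
            if path_idx < cols.length then
              let path := PySem.Str.stripChars (PySem.Str.strip (cols.getD path_idx "")) "\""
              if path ≠ "" then acc ++ [path] else acc
            else acc) refs
        else if headers.contains "sku" then
          let sku_idx := (PySem.List.index? headers "sku").getD 0
          lines.tail.foldl (fun acc row =>
            let cols := (PySem.Str.split? row ",").getD []
            if sku_idx < cols.length then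
              let sku := PySem.Str.stripChars (PySem.Str.strip (cols.getD sku_idx "")) "\""
              if sku ≠ "" then acc ++ [pvFstr "/proc/catalog/" sku ".json"] else acc
            else acc) refs
        else refs
      if headers.contains "store_id" then
        let store_idx := (PySem.List.index? headers "store_id").getD 0
        lines.tail.foldl (fun acc row =>
          let cols := (PySem.Str.split? row ",").getD []
          if store_idx < cols.length then
            let store_id := PySem.Str.stripChars (PySem.Str.strip (cols.getD store_idx "")) "\""
            if store_id ≠ "" then acc ++ [pvFstr "/proc/stores/" store_id ".json"] else acc
          else acc) refs1
      else refs1) []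

-- ===== PORT B =====
-- Source B's inner body for one (spec, bucket) pair
def pvBucketStep (spec? : Option (Nat × String × String)) (cols : List String) (b : List String) : List String :=
  match spec? with
  | none => b
  | some (idx, pre, suf) =>
    if idx < cols.length then
      let val := PySem.Str.stripChars (PySem.Str.strip (cols.getD idx "")) "\""
      if val ≠ "" then b ++ [pvFstr pre val suf] else b
    else b

def extract_sku_refs_py_alt (queries : List String) (results : List String) : List String :=
  results.foldl (fun refs txt =>
    let lines := pvCleanLines txt
    if lines.length < 2 then refs
    else
      let headers := pvHeaders (lines.headD "")
      let spec1 : Option (Nat × String × String) :=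
        if headers.contains "path" then
          some ((PySem.List.index? headers "path").getD 0, "", "")
        else if headers.contains "sku" then
          some ((PySem.List.index? headers "sku").getD 0, "/proc/catalog/", ".json")
        else none
      let spec2 : Option (Nat × String × String) :=
        if headers.contains "store_id" then
          some ((PySem.List.index? headers "store_id").getD 0, "/proc/stores/", ".json")
        else none
      let bs := lines.tail.foldl (fun (bs : List String × List String) row =>
        let cols := (PySem.Str.split? row ",").getD []
        (pvBucketStep spec1 cols bs.1, pvBucketStep spec2 cols bs.2)) ([], [])
      refs ++ bs.1 ++ bs.2) []

-- ===== PRECONDITION & SPEC =====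
def Spec_extract_sku_refs_py (queries : List String) (results : List String) (out : List String) : Prop := out = extract_sku_refs_py_alt queries results
instance (queries : List String) (results : List String) (out : List String) : Decidable (Spec_extract_sku_refs_py queries results out) := by unfold Spec_extract_sku_refs_py; infer_instance

-- ===== CLAIM (what is proved, stated in full; the proofs are below) =====
def Claim_equal_extract_sku_refs_py : Prop := ∀ (queries : List String) (results : List String), Dom_extract_sku_refs_py queries results → Spec_extract_sku_refs_py queries results (extract_sku_refs_py queries results)

-- ===== LEMMAS AND PROOFS =====

-- what one row contributes under one spec
def pvRowOut (spec? : Option (Nat × String × String)) (row : String) : List String :=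
  match spec? with
  | none => []
  | some (idx, pre, suf) =>
    let cols := (PySem.Str.split? row ",").getD []
    if idx < cols.length then
      let val := PySem.Str.stripChars (PySem.Str.strip (cols.getD idx "")) "\""
      if val ≠ "" then [pvFstr pre val suf] else []
    else []

theorem pvBucketStep_eq (spec? : Option (Nat × String × String)) (row : String) (b : List String) :
    pvBucketStep spec? ((PySem.Str.split? row ",").getD []) b = b ++ pvRowOut spec? row := by
  cases spec? with
  | none => simp [pvBucketStep, pvRowOut]
  | some s =>
    obtain ⟨idx, pre, suf⟩ := s
    simp only [pvBucketStep, pvRowOut]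
    split_ifs <;> simp

theorem pvPairFold (s1 s2 : Option (Nat × String × String)) (rows : List String) :
    ∀ b1 b2 : List String,
    rows.foldl (fun (bs : List String × List String) row =>
        let cols := (PySem.Str.split? row ",").getD []
        (pvBucketStep s1 cols bs.1, pvBucketStep s2 cols bs.2)) (b1, b2)
      = (b1 ++ rows.flatMap (pvRowOut s1), b2 ++ rows.flatMap (pvRowOut s2)) := by
  induction rows with
  | nil => intro b1 b2; simp
  | cons r rs ih =>
    intro b1 b2
    simp only [List.foldl_cons, List.flatMap_cons]
    rw [ih]
    simp [pvBucketStep_eq, List.append_assoc]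

-- one of A's row loops equals 'start ++ flatMap (pvRowOut spec)'
theorem pvApass (idx : Nat) (pre suf : String) (rows : List String) (start : List String) :
    rows.foldl (fun acc row =>
        let cols := (PySem.Str.split? row ",").getD []
        if idx < cols.length then
          let v := PySem.Str.stripChars (PySem.Str.strip (cols.getD idx "")) "\""
          if v ≠ "" then acc ++ [pvFstr pre v suf] else acc
        else acc) start
      = start ++ rows.flatMap (pvRowOut (some (idx, pre, suf))) := by
  induction rows generalizing start with
  | nil => simp
  | cons r rs ih =>
    simp only [List.foldl_cons, List.flatMap_cons]
    rw [ih]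
    simp only [pvRowOut]
    split_ifs <;> simp [List.append_assoc]

theorem pvFstr_id (v : String) : pvFstr "" v "" = v := by
  simp [pvFstr]

theorem pvApass_path (idx : Nat) (rows : List String) (start : List String) :
    rows.foldl (fun acc row =>
        let cols := (PySem.Str.split? row ",").getD []
        if idx < cols.length then
          let v := PySem.Str.stripChars (PySem.Str.strip (cols.getD idx "")) "\""
          if v ≠ "" then acc ++ [v] else acc
        else acc) start
      = start ++ rows.flatMap (pvRowOut (some (idx, "", ""))) := by
  have h := pvApass idx "" "" rows start
  simpa only [pvFstr_id] using h

theorem pvRowOut_none_flatMap (l : List String) : List.flatMap (pvRowOut none) l = [] := by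
  induction l with
  | nil => rfl
  | cons x xs ih => simp [pvRowOut, ih]

theorem extract_sku_refs_py_spec' (queries results : List String) :
    extract_sku_refs_py queries results = extract_sku_refs_py_alt queries results := by
  unfold extract_sku_refs_py extract_sku_refs_py_alt
  refine PySem.List.foldl_congr_mem _ _ _ _ ?_
  intro refs txt _
  dsimp only
  by_cases hlen : (pvCleanLines txt).length < 2
  · simp only [hlen, if_true]
  · simp only [hlen, if_false]
    rw [pvPairFold]
    by_cases hp : (pvHeaders ((pvCleanLines txt).headD "")).contains "path" <;>
      by_cases hsk : (pvHeaders ((pvCleanLines txt).headD "")).contains "sku" <;>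
        by_cases hst : (pvHeaders ((pvCleanLines txt).headD "")).contains "store_id" <;>
          simp only [hp, hsk, hst, if_true, List.nil_append] <;>
            (try rw [pvApass_path]) <;> (try rw [pvApass]) <;> (try rw [pvApass]) <;>
              simp only [Bool.false_eq_true, if_false, List.append_assoc,
                List.append_nil, pvRowOut_none_flatMap]

-- ===== VERDICT (by name: the statement is the Claim_ definition above) =====
theorem extract_sku_refs_py_spec : Claim_equal_extract_sku_refs_py := by
  intro queries results _
  exact extract_sku_refs_py_spec' queries results
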